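-- pv_equiv track=rewrite | github.com/finknottle/wine_app | app.py | _assign_flight_tiers
-- ===== SOURCE A (Python) =====
-- def _assign_flight_tiers(recs: list[dict]) -> list[dict]:
--     """Tag recs as a 'flight': core / explore / wildcard."""
--     out = []
--     for i, r in enumerate(recs or []):
--         r2 = dict(r)
--         if i < 3:
--             r2["flight_tier"] = "core"
--         elif i < 5:
--             r2["flight_tier"] = "explore"
--         else:
--             r2["flight_tier"] = "wildcard"
--         out.append(r2)
--     return out
-- ===== SOURCE B (Python) =====
-- def _assign_flight_tiers(recs: list[dict]) -> list[dict]: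
--     """Tag recs as a 'flight': core / explore / wildcard."""
--     recs = recs or []
--
--     def tag(tier, rs):
--         out = []
--         for r in rs:
--             r2 = dict(r)
--             r2["flight_tier"] = tier
--             out.append(r2)
--         return out
--
--     return tag("core", recs[:3]) + tag("explore", recs[3:5]) + tag("wildcard", recs[5:])
-- ===== Notes on version B (the rewrite author's own statement) =====
-- stated objective: alternative
-- what changed: Replaces the single enumerate loop with per-index tier branching by slicing the input into its three fixed contiguous segments (recs[:3], recs[3:5], recs[5:]), tagging each segment uniformly and concatenating.
import Mathlib
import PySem

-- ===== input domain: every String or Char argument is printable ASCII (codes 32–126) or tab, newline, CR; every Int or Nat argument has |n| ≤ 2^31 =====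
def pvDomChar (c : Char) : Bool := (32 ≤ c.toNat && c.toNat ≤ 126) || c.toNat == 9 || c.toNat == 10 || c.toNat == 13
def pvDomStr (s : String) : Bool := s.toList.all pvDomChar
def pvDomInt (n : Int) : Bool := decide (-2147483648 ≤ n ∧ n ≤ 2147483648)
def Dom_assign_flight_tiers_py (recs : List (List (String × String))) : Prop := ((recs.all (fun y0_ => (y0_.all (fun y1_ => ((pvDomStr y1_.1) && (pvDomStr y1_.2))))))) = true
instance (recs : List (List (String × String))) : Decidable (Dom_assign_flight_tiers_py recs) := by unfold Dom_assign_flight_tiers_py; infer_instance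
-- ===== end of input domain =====

-- B tags the three fixed contiguous tier segments (recs[:3], recs[3:5], recs[5:]) uniformly
-- instead of branching on the index inside one enumerate loop; same cost, different decomposition.


-- ===== PORT A =====
-- dict(r) followed by r2["flight_tier"] = … is ported through PySem.Dict (copy, then insert).
def assign_flight_tiers_py (recs : List (List (String × String))) : List (List (String × String)) :=
  (PySem.List.enumerate recs 0).foldl
    (fun out ir =>
      let r2 := (PySem.Dict.ofList ir.2).insert "flight_tier"
        (if ir.1 < 3 then "core" else if ir.1 < 5 then "explore" else "wildcard")
      out ++ [r2.items]) []

-- ===== PORT B =====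
def pvTag (tier : String) (rs : List (List (String × String))) : List (List (String × String)) :=
  rs.foldl (fun out r => out ++ [((PySem.Dict.ofList r).insert "flight_tier" tier).items]) []

def assign_flight_tiers_py_alt (recs : List (List (String × String))) : List (List (String × String)) :=
  pvTag "core" (PySem.List.slice recs none (some 3)) ++
  pvTag "explore" (PySem.List.slice recs (some 3) (some 5)) ++
  pvTag "wildcard" (PySem.List.slice recs (some 5) none)

-- ===== PRECONDITION & SPEC =====
def Spec_assign_flight_tiers_py (recs : List (List (String × String))) (out : List (List (String × String))) : Prop := out = assign_flight_tiers_py_alt recs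
instance (recs : List (List (String × String))) (out : List (List (String × String))) : Decidable (Spec_assign_flight_tiers_py recs out) := by unfold Spec_assign_flight_tiers_py; infer_instance

-- ===== CLAIM (what is proved, stated in full; the proofs are below) =====
def Claim_equal_assign_flight_tiers_py : Prop := ∀ (recs : List (List (String × String))), Dom_assign_flight_tiers_py recs → Spec_assign_flight_tiers_py recs (assign_flight_tiers_py recs)

-- ===== LEMMAS AND PROOFS =====

-- the per-record transform both ports apply
def pvStep (tier : String) (r : List (String × String)) : List (String × String) :=
  ((PySem.Dict.ofList r).insert "flight_tier" tier).items

theorem pvTag_eq_map (tier : String) (rs : List (List (String × String))) :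
    pvTag tier rs = rs.map (pvStep tier) := by
  suffices h : ∀ acc, rs.foldl (fun out r => out ++ [pvStep tier r]) acc = acc ++ rs.map (pvStep tier) by
    simpa [pvTag, pvStep] using h []
  induction rs with
  | nil => simp
  | cons x xs ih => intro acc; simp [List.foldl, ih]

-- the tail of A's loop: once the index is ≥ 5, every record gets "wildcard"
theorem foldA_tail (rs : List (List (String × String))) :
    ∀ (s : Int), 5 ≤ s →
    (List.map
        (fun ir : Int × List (String × String) =>
          [((PySem.Dict.ofList ir.2).insert "flight_tier"
              (if ir.1 < 3 then "core" else if ir.1 < 5 then "explore" else "wildcard")).items])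
        (PySem.List.enumerate rs s)).flatten = rs.map (pvStep "wildcard") := by
  induction rs with
  | nil => intro s _; simp [PySem.List.enumerate_nil]
  | cons x xs ih =>
    intro s hs
    rw [PySem.List.enumerate_cons]
    have h3 : ¬ (s < 3) := by omega
    have h5 : ¬ (s < 5) := by omega
    simp only [List.map, List.flatten, h3, h5, if_false]
    rw [ih (s + 1) (by omega)]
    simp [pvStep]

theorem assign_eq (recs : List (List (String × String))) :
    assign_flight_tiers_py recs = assign_flight_tiers_py_alt recs := by
  have hslice1 : PySem.List.slice recs none (some 3) = recs.take 3 := by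
    simpa using PySem.List.slice_to_natCast (xs := recs) (b := 3)
  have hslice2 : PySem.List.slice recs (some 3) (some 5) = (recs.drop 3).take 2 := by
    simpa using PySem.List.slice_natCast (xs := recs) (a := 3) (b := 5)
  have hslice3 : PySem.List.slice recs (some 5) none = recs.drop 5 := by
    simpa using PySem.List.slice_from_natCast (xs := recs) (a := 5)
  unfold assign_flight_tiers_py assign_flight_tiers_py_alt
  rw [hslice1, hslice2, hslice3, pvTag_eq_map, pvTag_eq_map, pvTag_eq_map]
  match recs with
  | [] => simp [PySem.List.enumerate_nil]
  | [a] =>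
      simp [PySem.List.enumerate_cons, PySem.List.enumerate_nil, pvStep]
  | [a, b] =>
      simp [PySem.List.enumerate_cons, PySem.List.enumerate_nil, pvStep]
  | [a, b, c] =>
      simp [PySem.List.enumerate_cons, PySem.List.enumerate_nil, pvStep]
  | [a, b, c, d] =>
      norm_num [PySem.List.enumerate_cons, PySem.List.enumerate_nil, pvStep]
  | [a, b, c, d, e] =>
      norm_num [PySem.List.enumerate_cons, PySem.List.enumerate_nil, pvStep]
  | a :: b :: c :: d :: e :: rest =>
      norm_num [PySem.List.enumerate_cons, pvStep]
      exact foldA_tail rest 5 (by norm_num)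

-- ===== VERDICT (by name: the statement is the Claim_ definition above) =====
theorem assign_flight_tiers_py_spec : Claim_equal_assign_flight_tiers_py := by
  intro recs _
  unfold Spec_assign_flight_tiers_py
  exact assign_eq recs
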